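-- pv_equiv track=rewrite | github.com/saanghyuk/python_lecture | homework/lab_8/linux_mac/morsecode.py | is_validated_morse_code
-- ===== SOURCE A (Python) =====
-- def get_morse_code_dict():
--     morse_code = {
--         "A": ".-", "N": "-.", "B": "-...", "O": "---", "C": "-.-.", "P": ".--.", "D": "-..", "Q": "--.-", "E": ".",
--         "R": ".-.", "F": "..-.", "S": "...", "G": "--.", "T": "-", "H": "....", "U": "..-", "I": "..", "V": "...-",
--         "K": "-.-", "X": "-..-", "J": ".---", "W": ".--", "L": ".-..", "Y": "-.--", "M": "--", "Z": "--.."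
--     }
--     return morse_code
--
-- def is_validated_morse_code(user_input):
--     # """
--     # Input:
--     #     - user_input : 문자열값으로 사용자가 입력하는 문자
--     # Output:
--     #     - 입력한 값이 아래에 해당될 경우 False, 그렇지 않으면 True
--     #       1) "-","."," "외 다른 글자가 포함되어 있는 경우
--     #       2) get_morse_code_dict 함수에 정의된 Morse Code 부호외 다른 코드가 입력된 경우 ex)......
--     # Examples:
--     #     >>> import morsecode as mc
--     #     >>> mc.is_validated_morse_code("..")
--     #     True
--     #     >>> mc.is_validated_morse_code("..-")
--     #     True
--     #     >>> mc.is_validated_morse_code("..-..")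
--     #     False
--     #     >>> mc.is_validated_morse_code(". . . .")
--     #     True
--     #     >>> mc.is_validated_morse_code("-- -- -- --")
--     #     True
--     #     >>> mc.is_validated_morse_code("!.1 abc --")
--     #     False
--     # """
--     # ===Modify codes below=============
--     # 조건에 따라 변환되어야 할 결과를 result 변수에 할당 또는 필요에 따라 자유로운 수정
--     result = ""
--
--     morseMatch=([i for i in get_morse_code_dict().values()])
--     splitted=user_input.split()
--     same_list = [j for i in morseMatch for j in splitted if i==j]
--     #
--
--     if(len(same_list) == len(splitted)):
--         result = True
--     else:
--         result = False
--
--     return result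
-- ===== SOURCE B (Python) =====
-- def get_morse_code_dict():
--     morse_code = {
--         "A": ".-", "N": "-.", "B": "-...", "O": "---", "C": "-.-.", "P": ".--.", "D": "-..", "Q": "--.-", "E": ".",
--         "R": ".-.", "F": "..-.", "S": "...", "G": "--.", "T": "-", "H": "....", "U": "..-", "I": "..", "V": "...-",
--         "K": "-.-", "X": "-..-", "J": ".---", "W": ".--", "L": ".-..", "Y": "-.--", "M": "--", "Z": "--.."
--     }
--     return morse_code
--
-- # The 26 letter codes are exactly the dot/dash strings of length 1..4 except these four
-- # (which encode no letter), so validity has a closed-form shape test per token.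
-- _NON_LETTER_CODES = ("..--", ".-.-", "---.", "----")
--
-- def _is_letter_code(tok):
--     if not (1 <= len(tok) <= 4):
--         return False
--     for ch in tok:
--         if ch != "." and ch != "-":
--             return False
--     return tok not in _NON_LETTER_CODES
--
-- def is_validated_morse_code(user_input):
--     return all(_is_letter_code(tok) for tok in user_input.split())
-- ===== Notes on version B (the rewrite author's own statement) =====
-- stated objective: alternative
-- what changed: Replaces the nested 26xN scan that counts (code,token) matching pairs and compares lengths with a single pass validating each token by a closed-form shape test (length 1..4, only '.'/'-' characters, not one of the four non-letter length-4 codes), using no code table lookup at all.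
import Mathlib
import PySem

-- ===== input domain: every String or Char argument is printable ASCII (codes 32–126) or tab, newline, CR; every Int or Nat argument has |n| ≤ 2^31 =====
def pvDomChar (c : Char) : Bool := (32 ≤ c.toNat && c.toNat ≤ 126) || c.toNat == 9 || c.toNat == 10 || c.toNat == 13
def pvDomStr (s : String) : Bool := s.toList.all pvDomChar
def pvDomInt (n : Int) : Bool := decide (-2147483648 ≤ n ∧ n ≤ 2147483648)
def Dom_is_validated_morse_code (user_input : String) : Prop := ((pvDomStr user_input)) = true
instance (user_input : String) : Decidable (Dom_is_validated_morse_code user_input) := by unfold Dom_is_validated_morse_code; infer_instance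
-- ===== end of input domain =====

-- B replaces A's nested scan that counts (code, token) matching pairs and compares lengths
-- with a single pass validating each token by a closed-form shape test (length 1..4, only
-- '.'/'-' characters, and not one of the four such length-4 strings that encode no letter).


-- ===== PORT A =====
-- shared module helper (A's Python calls it; B's closed-form test does not)
def get_morse_code_dict : PySem.Dict String String :=
  PySem.Dict.mk [("A", ".-"), ("N", "-."), ("B", "-..."), ("O", "---"), ("C", "-.-."), ("P", ".--."),
   ("D", "-.."), ("Q", "--.-"), ("E", "."), ("R", ".-."), ("F", "..-."), ("S", "..."),
   ("G", "--."), ("T", "-"), ("H", "...."), ("U", "..-"), ("I", ".."), ("V", "...-"),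
   ("K", "-.-"), ("X", "-..-"), ("J", ".---"), ("W", ".--"), ("L", ".-.."), ("Y", "-.--"),
   ("M", "--"), ("Z", "--..")]

def is_validated_morse_code (user_input : String) : Bool :=
  let morseMatch := (get_morse_code_dict).values
  let splitted := PySem.Str.split₀ user_input
  let same_list := morseMatch.flatMap (fun i => splitted.filter (fun j => i == j))
  same_list.length == splitted.length

-- ===== PORT B =====
-- the four dot/dash strings of length 4 that are not letter codes (Source B's _NON_LETTER_CODES)
def pvNonLetterCodes : List (List Char) :=
  [['.', '.', '-', '-'], ['.', '-', '.', '-'], ['-', '-', '-', '.'], ['-', '-', '-', '-']]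

-- Source B's _is_letter_code: length guard, character loop, then the non-letter exclusion
def pvIsLetterCode (tok : List Char) : Bool :=
  if !(1 ≤ tok.length && tok.length ≤ 4) then false
  else if !(tok.all (fun ch => ch == '.' || ch == '-')) then false
  else !(pvNonLetterCodes.contains tok)

def is_validated_morse_code_alt (user_input : String) : Bool :=
  (PySem.Chars.split₀ user_input.toList).all (fun tok => pvIsLetterCode tok)

-- ===== PRECONDITION & SPEC =====
def Spec_is_validated_morse_code (user_input : String) (out : Bool) : Prop := out = is_validated_morse_code_alt user_input
instance (user_input : String) (out : Bool) : Decidable (Spec_is_validated_morse_code user_input out) := by unfold Spec_is_validated_morse_code; infer_instance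

-- ===== CLAIM (what is proved, stated in full; the proofs are below) =====
def Claim_equal_is_validated_morse_code : Prop := ∀ (user_input : String), Dom_is_validated_morse_code user_input → Spec_is_validated_morse_code user_input (is_validated_morse_code user_input)

-- ===== LEMMAS AND PROOFS =====

lemma sum_ite_eq_count (j : String) (codes : List String) :
    (codes.map (fun i => if i = j then 1 else 0)).sum = codes.count j := by
  induction codes with
  | nil => simp
  | cons c cs ih => by_cases h : c = j <;> simp [h, ih] <;> omega

-- the number of (code, token) matching pairs equals the number of valid tokens, when codes are distinct
lemma flatMap_filter_len (codes sp : List String) (h : codes.Nodup) :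
    (codes.flatMap (fun i => sp.filter (fun j => i == j))).length
      = (sp.filter (fun j => codes.contains j)).length := by
  induction sp with
  | nil => simp
  | cons j rest ih =>
    have hfc : ∀ i : String,
        ((j :: rest).filter (fun k => i == k)).length
          = (if i = j then 1 else 0) + (rest.filter (fun k => i == k)).length := by
      intro i
      by_cases hij : i = j <;> simp [hij] <;> omega
    have hsum : (codes.flatMap (fun i => (j :: rest).filter (fun k => i == k))).length
        = (codes.map (fun i => if i = j then 1 else 0)).sum
          + (codes.flatMap (fun i => rest.filter (fun k => i == k))).length := by
      simp only [List.length_flatMap]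
      rw [show (codes.map fun i => ((j :: rest).filter (fun k => i == k)).length)
            = codes.map (fun i => (if i = j then 1 else 0) + (rest.filter (fun k => i == k)).length)
          from List.map_congr_left (fun i _ => hfc i)]
      rw [List.sum_map_add]
    have hcnt : (codes.map (fun i => if i = j then 1 else 0)).sum
        = (if codes.contains j then 1 else 0) := by
      by_cases hm : j ∈ codes
      · have h1 : codes.count j = 1 := List.count_eq_one_of_mem h hm
        simp [sum_ite_eq_count, h1, hm]
      · have h0 : codes.count j = 0 := List.count_eq_zero_of_not_mem hm
        simp [sum_ite_eq_count, h0, hm]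
    rw [hsum, hcnt, ih, List.filter_cons]
    by_cases hm : j ∈ codes <;> simp [hm] <;> omega

lemma filter_len_eq_iff_all (p : String → Bool) (sp : List String) :
    ((sp.filter p).length == sp.length) = sp.all p := by
  induction sp with
  | nil => simp
  | cons j rest ih =>
    by_cases hj : p j
    · simp [hj, ← ih]
    · have hle : (rest.filter p).length ≤ rest.length := List.length_filter_le _ _
      simp [hj, Nat.ne_of_lt (Nat.lt_succ_of_le hle)]

lemma beq_ofList (a b : List Char) : (String.ofList a == String.ofList b) = (a == b) := by
  by_cases h : a = b
  · simp [h]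
  · have : String.ofList a ≠ String.ofList b := fun hc =>
      h (by simpa using congrArg String.toList hc)
    simp [h, this]

lemma contains_map_ofList (cs : List (List Char)) (l : List Char) :
    ((cs.map String.ofList).contains (String.ofList l)) = cs.contains l := by
  induction cs with
  | nil => rfl
  | cons c t ih => simp only [List.map_cons, List.contains_cons, beq_ofList, ih]

-- the 26 codes as char lists, in dict-value order
def pvCodesL : List (List Char) :=
  [['.','-'], ['-','.'], ['-','.','.','.'], ['-','-','-'], ['-','.','-','.'], ['.','-','-','.'],
   ['-','.','.'], ['-','-','.','-'], ['.'], ['.','-','.'], ['.','.','-','.'], ['.','.','.'],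
   ['-','-','.'], ['-'], ['.','.','.','.'], ['.','.','-'], ['.','.'], ['.','.','.','-'],
   ['-','.','-'], ['-','.','.','-'], ['.','-','-','-'], ['.','-','-'], ['.','-','.','.'],
   ['-','.','-','-'], ['-','-'], ['-','-','.','.']]

lemma values_eq : (get_morse_code_dict).values = pvCodesL.map String.ofList := by decide

-- per-token equivalence: membership in the 26 codes is exactly B's shape test
lemma tok_eq (tok : List Char) :
    pvCodesL.contains tok = pvIsLetterCode tok := by
  by_cases hshape : tok.length ≤ 4 ∧ (tok.all (fun ch => ch == '.' || ch == '-')) = true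
  · obtain ⟨hlen, hdd⟩ := hshape
    rcases tok with _ | ⟨a, _ | ⟨b, _ | ⟨c, _ | ⟨d, _ | ⟨e, t⟩⟩⟩⟩⟩
    · decide
    · simp only [List.all_cons, List.all_nil, Bool.and_true, Bool.or_eq_true, beq_iff_eq] at hdd
      rcases hdd with rfl | rfl <;> decide
    · simp only [List.all_cons, List.all_nil, Bool.and_true, Bool.or_eq_true, beq_iff_eq,
        Bool.and_eq_true] at hdd
      obtain ⟨ha, hb⟩ := hdd
      rcases ha with rfl | rfl <;> rcases hb with rfl | rfl <;> decide
    · simp only [List.all_cons, List.all_nil, Bool.and_true, Bool.or_eq_true, beq_iff_eq,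
        Bool.and_eq_true] at hdd
      obtain ⟨ha, hb, hc⟩ := hdd
      rcases ha with rfl | rfl <;> rcases hb with rfl | rfl <;> rcases hc with rfl | rfl <;> decide
    · simp only [List.all_cons, List.all_nil, Bool.and_true, Bool.or_eq_true, beq_iff_eq,
        Bool.and_eq_true] at hdd
      obtain ⟨ha, hb, hc, hd⟩ := hdd
      rcases ha with rfl | rfl <;> rcases hb with rfl | rfl <;> rcases hc with rfl | rfl <;>
        rcases hd with rfl | rfl <;> decide
    · exfalso; simp at hlen; omega
  · have h1 : pvCodesL.contains tok = false := by
      rw [Bool.eq_false_iff]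
      intro hne
      have hm : tok ∈ pvCodesL := by simpa using hne
      fin_cases hm <;> exact hshape (by decide)
    have h2 : pvIsLetterCode tok = false := by
      unfold pvIsLetterCode
      rcases Decidable.not_and_iff_or_not.mp hshape with h | h
      · have : ¬ tok.length ≤ 4 := h
        have hfalse : (1 ≤ tok.length && tok.length ≤ 4) = false := by
          simp; omega
        simp [hfalse]
      · simp [Bool.eq_false_iff.mpr h]
    rw [h1, h2]

-- ===== VERDICT (by name: the statement is the Claim_ definition above) =====
theorem is_validated_morse_code_spec : Claim_equal_is_validated_morse_code := by
  intro u _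
  unfold Spec_is_validated_morse_code is_validated_morse_code is_validated_morse_code_alt
  simp only []
  have hnd : ((get_morse_code_dict).values).Nodup := by decide
  rw [flatMap_filter_len _ _ hnd, filter_len_eq_iff_all]
  rw [show PySem.Str.split₀ u = (PySem.Chars.split₀ u.toList).map String.ofList from rfl,
      List.all_map]
  congr 1
  funext tok
  show ((get_morse_code_dict).values).contains (String.ofList tok) = pvIsLetterCode tok
  rw [values_eq, contains_map_ofList, tok_eq]
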